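-- pv_equiv track=rewrite | github.com/cwyang/boj | 5525.py | solve
-- ===== SOURCE A (Python) =====
-- def solve(n, m, s):
--     cnt, run = 0, 0
--     def nextc():
--         return 'I' if run % 2 == 0 else 'O'
--     def update_score(r):
--         sc = (r-1) // 2
--         if sc >= n:
--             return sc - n + 1
--         else:
--             return 0
--     for c in s:
--         if nextc() == c:
--             run += 1
--         else:
--             cnt += update_score(run)
--             if c == 'I':
--                 run = 1
--             else:
--                 run = 0
--     cnt += update_score(run)
--     return cnt
-- ===== SOURCE B (Python) =====
-- def solve(n, m, s):
--     # Count maximal I(OI)* runs directly by scanning OI-pairs; each run with k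
--     # pairs contributes max(0, k - n + 1) occurrences of the P_n pattern.
--     total = 0
--     i = 0
--     while i < len(s):
--         if s[i] == 'I':
--             k = 0
--             while i + 2 < len(s) and s[i+1] == 'O' and s[i+2] == 'I':
--                 k += 1
--                 i += 2
--             total += max(0, k - n + 1)
--         i += 1
--     return total
-- ===== Notes on version B (the rewrite author's own statement) =====
-- stated objective: idiomatic
-- what changed: Replaces A's character-by-character state machine (parity-coded run length, expected-char helper and flush-on-break scoring) by the classic direct scan for maximal I(OI)* runs: an index loop that, at each 'I', greedily counts consecutive 'OI' pairs and adds max(0, k - n + 1) per run.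
-- outside the precondition, e.g. on solve(-1, 0, 'OO'): A returns 3, B returns 0
import Mathlib
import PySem

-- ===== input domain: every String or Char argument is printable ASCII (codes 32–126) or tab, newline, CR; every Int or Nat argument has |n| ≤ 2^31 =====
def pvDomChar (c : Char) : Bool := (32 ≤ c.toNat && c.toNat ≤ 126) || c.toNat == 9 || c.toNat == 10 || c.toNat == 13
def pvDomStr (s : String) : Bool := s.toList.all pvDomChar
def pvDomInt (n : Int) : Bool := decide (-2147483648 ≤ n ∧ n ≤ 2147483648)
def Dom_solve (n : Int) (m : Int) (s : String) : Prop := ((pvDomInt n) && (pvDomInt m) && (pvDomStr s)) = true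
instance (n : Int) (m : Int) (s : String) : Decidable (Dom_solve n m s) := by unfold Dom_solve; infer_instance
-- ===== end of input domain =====

-- B replaces A's run-parity state machine by the classic direct scan for maximal
-- I(OI)* runs (count OI-pairs per run, add max(0,k-n+1)); same O(len s) cost.


-- ===== PORT A =====
def updateScoreA (n r : Int) : Int :=
  let sc := PySem.Int.floordiv (r - 1) 2
  if sc ≥ n then sc - n + 1 else 0

def stepA (n : Int) (st : Int × Int) (c : Char) : Int × Int :=
  let nextc : Char := if PySem.Int.mod st.2 2 = 0 then 'I' else 'O'
  if nextc = c then (st.1, st.2 + 1)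
  else (st.1 + updateScoreA n st.2, if c = 'I' then (1 : Int) else 0)

def solve (n : Int) (m : Int) (s : String) : Int :=
  let fin := s.toList.foldl (stepA n) (0, 0)
  fin.1 + updateScoreA n fin.2

-- ===== PORT B =====
-- the fuel argument only makes the while-loops total; cs.length steps always suffice
def innerB (cs : List Char) : Nat → Nat → Int → Int × Nat
  | 0, i, k => (k, i)
  | fuel+1, i, k =>
    if i + 2 < cs.length ∧ cs.getD (i+1) ' ' = 'O' ∧ cs.getD (i+2) ' ' = 'I' then
      innerB cs fuel (i+2) (k+1)
    else (k, i)

def outerB (n : Int) (cs : List Char) : Nat → Nat → Int → Int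
  | 0, _, total => total
  | fuel+1, i, total =>
    if i < cs.length then
      if cs.getD i ' ' = 'I' then
        let p := innerB cs cs.length i 0
        outerB n cs fuel (p.2 + 1) (total + max 0 (p.1 - n + 1))
      else outerB n cs fuel (i+1) total
    else total

def solve_alt (n : Int) (m : Int) (s : String) : Int :=
  outerB n s.toList s.toList.length 0 0

-- ===== PRECONDITION & SPEC =====
-- Pre_ restricts to the problem's natural domain 0 ≤ n (n is the pattern-size count);
-- for negative n A additionally adds -n for every breaking character met outside a run
-- (a flush of an empty run), which B's run-based count does not reproduce.
def Pre_solve (n : Int) (m : Int) (s : String) : Prop := 0 ≤ n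
instance (n : Int) (m : Int) (s : String) : Decidable (Pre_solve n m s) := by unfold Pre_solve; infer_instance
def pvWitness_solve : Int × Int × String := (1, 0, "OOIOIOIIOII")

def Spec_solve (n : Int) (m : Int) (s : String) (out : Int) : Prop := out = solve_alt n m s
instance (n : Int) (m : Int) (s : String) (out : Int) : Decidable (Spec_solve n m s out) := by unfold Spec_solve; infer_instance

-- ===== CLAIM (what is proved, stated in full; the proofs are below) =====
def Claim_equal_solve : Prop := ∀ (n : Int) (m : Int) (s : String), Dom_solve n m s → Pre_solve n m s → Spec_solve n m s (solve n m s)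

-- ===== LEMMAS AND PROOFS =====
def foldA (n : Int) (st : Int × Int) (l : List Char) : Int :=
  let fin := l.foldl (stepA n) st
  fin.1 + updateScoreA n fin.2

theorem foldA_cons (n : Int) (st : Int × Int) (c : Char) (l : List Char) :
    foldA n st (c :: l) = foldA n (stepA n st c) l := rfl

theorem foldA_nil (n : Int) (st : Int × Int) :
    foldA n st [] = st.1 + updateScoreA n st.2 := rfl

theorem us_odd (n k : Int) : updateScoreA n (2*k+1) = max 0 (k - n + 1) := by
  have h : PySem.Int.floordiv (2*k+1-1) 2 = k := by
    rw [PySem.Int.floordiv_eq_ediv_of_pos (by norm_num)]; omega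
  simp only [updateScoreA, h]
  split <;> omega

theorem us_even (n k : Int) : updateScoreA n (2*k+2) = max 0 (k - n + 1) := by
  have h : PySem.Int.floordiv (2*k+2-1) 2 = k := by
    rw [PySem.Int.floordiv_eq_ediv_of_pos (by norm_num)]; omega
  simp only [updateScoreA, h]
  split <;> omega

theorem us_zero (n : Int) (hn : 0 ≤ n) : updateScoreA n 0 = 0 := by
  have h : PySem.Int.floordiv ((0:Int)-1) 2 = -1 := by
    rw [PySem.Int.floordiv_eq_ediv_of_pos (by norm_num)]; omega
  simp only [updateScoreA, h]
  split <;> omega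

theorem stepA_odd (n cnt k : Int) (c : Char) :
    stepA n (cnt, 2*k+1) c =
      if c = 'O' then (cnt, 2*k+2)
      else (cnt + max 0 (k - n + 1), if c = 'I' then (1:Int) else 0) := by
  by_cases hc : c = 'O'
  · subst hc
    simp [stepA, Prod.ext_iff]
    omega
  · simp [stepA, Ne.symm hc, hc, us_odd]

theorem stepA_evenrun (n cnt k : Int) (c : Char) :
    stepA n (cnt, 2*k+2) c =
      if c = 'I' then (cnt, 2*k+3) else (cnt + max 0 (k - n + 1), 0) := by
  by_cases hc : c = 'I'
  · subst hc
    simp [stepA, Prod.ext_iff]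
    omega
  · simp [stepA, Ne.symm hc, hc, us_even]

theorem stepA_zero (n : Int) (hn : 0 ≤ n) (cnt : Int) (c : Char) :
    stepA n (cnt, 0) c = if c = 'I' then (cnt, 1) else (cnt, 0) := by
  by_cases hc : c = 'I'
  · subst hc
    simp [stepA]
  · simp [stepA, Ne.symm hc, hc, us_zero n hn]

theorem dropCons (cs : List Char) (i : Nat) (h : i < cs.length) :
    cs.drop i = cs.getD i ' ' :: cs.drop (i+1) := by
  rw [List.drop_eq_getElem_cons h, List.getD_eq_getElem _ _ h]

theorem innerB_step (cs : List Char) (f i : Nat) (k : Int)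
    (h : i + 2 < cs.length ∧ cs.getD (i+1) ' ' = 'O' ∧ cs.getD (i+2) ' ' = 'I') :
    innerB cs (f+1) i k = innerB cs f (i+2) (k+1) := by
  rw [innerB, if_pos h]

theorem innerB_stop (cs : List Char) (f i : Nat) (k : Int)
    (h : ¬ (i + 2 < cs.length ∧ cs.getD (i+1) ' ' = 'O' ∧ cs.getD (i+2) ' ' = 'I')) :
    innerB cs f i k = (k, i) := by
  cases f with
  | zero => rfl
  | succ f => rw [innerB, if_neg h]

theorem innerB_fuel (cs : List Char) (f₁ : Nat) : ∀ (f₂ i : Nat) (k : Int),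
    cs.length - i ≤ f₁ → cs.length - i ≤ f₂ → innerB cs f₁ i k = innerB cs f₂ i k := by
  induction f₁ with
  | zero =>
    intro f₂ i k h₁ h₂
    have hg : ¬ (i + 2 < cs.length ∧ cs.getD (i+1) ' ' = 'O' ∧ cs.getD (i+2) ' ' = 'I') :=
      fun hg => by omega
    rw [innerB_stop cs 0 i k hg, innerB_stop cs f₂ i k hg]
  | succ f ih =>
    intro f₂ i k h₁ h₂
    by_cases hg : i + 2 < cs.length ∧ cs.getD (i+1) ' ' = 'O' ∧ cs.getD (i+2) ' ' = 'I'
    · obtain ⟨g, rfl⟩ : ∃ g, f₂ = g+1 := ⟨f₂ - 1, by omega⟩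
      rw [innerB_step cs f i k hg, innerB_step cs g i k hg]
      exact ih g (i+2) (k+1) (by omega) (by omega)
    · rw [innerB_stop cs (f+1) i k hg, innerB_stop cs f₂ i k hg]

theorem outerB_stop (n : Int) (cs : List Char) (f i : Nat) (t : Int) (h : ¬ i < cs.length) :
    outerB n cs f i t = t := by
  cases f with
  | zero => rfl
  | succ f => rw [outerB, if_neg h]

theorem outerB_I (n : Int) (cs : List Char) (f i : Nat) (t : Int)
    (h : i < cs.length) (hc : cs.getD i ' ' = 'I') :
    outerB n cs (f+1) i t =
      outerB n cs f ((innerB cs cs.length i 0).2 + 1)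
        (t + max 0 ((innerB cs cs.length i 0).1 - n + 1)) := by
  rw [outerB, if_pos h, if_pos hc]

theorem outerB_skip (n : Int) (cs : List Char) (f i : Nat) (t : Int)
    (h : i < cs.length) (hc : ¬ cs.getD i ' ' = 'I') :
    outerB n cs (f+1) i t = outerB n cs f (i+1) t := by
  rw [outerB, if_pos h, if_neg hc]

-- the two mutually-recursive loop invariants, combined under one strong induction
theorem keyPQ (n : Int) (hn : 0 ≤ n) (cs : List Char) : ∀ N : Nat,
    (∀ i (k cnt : Int) (f : Nat), 2*(cs.length - i) + 1 ≤ N → cs.length - (i+1) ≤ f →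
       foldA n (cnt, 2*k+1) (cs.drop (i+1)) =
         outerB n cs f ((innerB cs cs.length i k).2 + 1)
           (cnt + max 0 ((innerB cs cs.length i k).1 - n + 1))) ∧
    (∀ j (cnt : Int) (f : Nat), 2*(cs.length - j) + 2 ≤ N → cs.length - j ≤ f →
       foldA n (cnt, 0) (cs.drop j) = outerB n cs f j cnt) := by
  intro N
  induction N using Nat.strong_induction_on with
  | _ N IH =>
    constructor
    · intro i k cnt f hN hf
      by_cases hg : i + 2 < cs.length ∧ cs.getD (i+1) ' ' = 'O' ∧ cs.getD (i+2) ' ' = 'I'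
      · -- the run extends by one OI pair
        obtain ⟨h2, hO, hI⟩ := hg
        have e : innerB cs cs.length i k = innerB cs cs.length (i+2) (k+1) := by
          obtain ⟨g, hg'⟩ : ∃ g, cs.length = g+1 := ⟨cs.length - 1, by omega⟩
          conv_lhs => rw [hg', innerB_step cs g i k ⟨h2, hO, hI⟩]
          exact innerB_fuel cs g cs.length (i+2) (k+1) (by omega) (by omega)
        rw [e]
        rw [dropCons cs (i+1) (by omega), foldA_cons, stepA_odd, hO, if_pos rfl]
        rw [dropCons cs (i+2) (by omega), foldA_cons, stepA_evenrun, hI, if_pos rfl]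
        rw [show (2*k+3 : Int) = 2*(k+1)+1 from by ring]
        exact (IH (N-1) (by omega)).1 (i+2) (k+1) cnt f (by omega) (by omega)
      · -- the run ends here
        rw [innerB_stop cs cs.length i k hg]
        by_cases h1 : i + 1 < cs.length
        · rw [dropCons cs (i+1) h1, foldA_cons, stepA_odd]
          obtain ⟨g, rfl⟩ : ∃ g, f = g+1 := ⟨f - 1, by omega⟩
          by_cases hc : cs.getD (i+1) ' ' = 'I'
          · -- break on 'I': flush, restart a run at i+1
            rw [if_neg (by rw [hc]; decide), if_pos hc]
            have h := (IH (N-1) (by omega)).1 (i+1) 0 (cnt + max 0 (k - n + 1)) g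
              (by omega) (by omega)
            rw [show (2*0+1 : Int) = 1 from by norm_num] at h
            rw [h, outerB_I n cs g (i+1) _ h1 hc]
          · by_cases hOc : cs.getD (i+1) ' ' = 'O'
            · -- the 'O' still extends the run, which must die right after (guard failed)
              rw [if_pos hOc]
              by_cases h2 : i + 2 < cs.length
              · have hc2 : cs.getD (i+2) ' ' ≠ 'I' := fun hI => hg ⟨h2, hOc, hI⟩
                obtain ⟨g2, rfl⟩ : ∃ g2, g = g2+1 := ⟨g - 1, by omega⟩
                rw [dropCons cs (i+2) h2, foldA_cons, stepA_evenrun, if_neg hc2]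
                have h := (IH (N-1) (by omega)).2 (i+3) (cnt + max 0 (k - n + 1)) g2
                  (by omega) (by omega)
                rw [h, outerB_skip n cs (g2+1) (i+1) _ h1 hc, outerB_skip n cs g2 (i+2) _ h2 hc2]
              · -- the string ends right after the 'O'
                rw [List.drop_eq_nil_of_le (by omega : cs.length ≤ i+2), foldA_nil]
                show cnt + updateScoreA n (2*k+2) = _
                rw [us_even, outerB_skip n cs g (i+1) _ h1 hc,
                    outerB_stop n cs g (i+2) _ (by omega)]
            · -- break on a char that is neither 'I' nor 'O': flush into the dead state
              rw [if_neg hOc, if_neg hc]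
              have h := (IH (N-1) (by omega)).2 (i+2) (cnt + max 0 (k - n + 1)) g
                (by omega) (by omega)
              rw [h, outerB_skip n cs g (i+1) _ h1 hc]
        · -- the string ends at the run's last 'I'
          rw [List.drop_eq_nil_of_le (by omega : cs.length ≤ i+1), foldA_nil]
          show cnt + updateScoreA n (2*k+1) = _
          rw [us_odd, outerB_stop n cs f (i+1) _ (by omega)]
    · intro j cnt f hN hf
      by_cases hj : j < cs.length
      · rw [dropCons cs j hj, foldA_cons, stepA_zero n hn]
        obtain ⟨g, rfl⟩ : ∃ g, f = g+1 := ⟨f - 1, by omega⟩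
        by_cases hc : cs.getD j ' ' = 'I'
        · rw [if_pos hc]
          have h := (IH (N-1) (by omega)).1 j 0 cnt g (by omega) (by omega)
          rw [show (2*0+1 : Int) = 1 from by norm_num] at h
          rw [h, outerB_I n cs g j cnt hj hc]
        · rw [if_neg hc]
          have h := (IH (N-1) (by omega)).2 (j+1) cnt g (by omega) (by omega)
          rw [h, outerB_skip n cs g j cnt hj hc]
      · rw [List.drop_eq_nil_of_le (by omega : cs.length ≤ j), foldA_nil]
        show cnt + updateScoreA n 0 = _
        rw [us_zero n hn, outerB_stop n cs f j cnt (by omega)]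
        ring

-- ===== VERDICT (by name: the statement is the Claim_ definition above) =====
theorem solve_spec : Claim_equal_solve := by
  intro n m s _ hn
  unfold Spec_solve solve solve_alt
  have h := (keyPQ n hn s.toList (2*s.toList.length + 2)).2 0 0 s.toList.length
    (by omega) (by omega)
  simpa [foldA] using h
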